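-- pv_equiv track=rewrite | github.com/Jetsie/TesCrack | RakTools.py | RemoveTrailingPadding
-- ===== SOURCE A (Python) =====
-- def RemoveTrailingPadding(hexList):
-- 	if hexList.count('0x00') == len(hexList):
-- 		return ['0x00']
-- 	final = hexList
-- 	for i in reversed(hexList):
-- 		if i == '0x00':
-- 			final.pop()
-- 		else:
-- 			return final
-- ===== SOURCE B (Python) =====
-- def RemoveTrailingPadding(hexList):
-- 	last = -1
-- 	for i, x in enumerate(hexList):
-- 		if x != '0x00':
-- 			last = i
-- 	if last == -1:
-- 		return ['0x00']
-- 	del hexList[last+1:]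
-- 	return hexList
-- ===== Notes on version B (the rewrite author's own statement) =====
-- stated objective: alternative
-- what changed: B replaces A's reverse iteration that pops one trailing '0x00' at a time (with an early return) by a single forward pass that records the index of the last non-padding element and then truncates once with del; the all-padding/empty case falls out of last == -1 instead of a count()==len() pre-scan.
import Mathlib
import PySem

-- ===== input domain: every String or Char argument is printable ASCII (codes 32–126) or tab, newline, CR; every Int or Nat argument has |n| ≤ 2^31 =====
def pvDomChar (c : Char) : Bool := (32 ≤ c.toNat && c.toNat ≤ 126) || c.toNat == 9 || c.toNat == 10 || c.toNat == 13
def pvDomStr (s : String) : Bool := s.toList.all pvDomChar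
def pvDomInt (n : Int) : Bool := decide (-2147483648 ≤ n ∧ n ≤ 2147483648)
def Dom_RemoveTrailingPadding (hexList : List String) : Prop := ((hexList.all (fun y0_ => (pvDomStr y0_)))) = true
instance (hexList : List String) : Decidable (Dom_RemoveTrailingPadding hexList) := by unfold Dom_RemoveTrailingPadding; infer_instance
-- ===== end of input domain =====

-- B trims the trailing '0x00' padding with one forward pass recording the last non-padding
-- index and a single truncation, instead of A's count() pre-scan plus reverse-iterate-and-pop;
-- both Pythons mutate the input list in place (except in the all-padding case) — the
-- equivalence proved here is about the RETURN value only.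

-- ===== PORT A =====
-- A's 'for i in reversed(hexList): pop/return' loop: because every pop removes the last
-- element, the value yielded at each step is exactly the next element of hexList.reverse,
-- and 'final.pop()' is dropLast (final is nonempty on every reached call: the loop runs
-- only when not all elements are '0x00'); if the loop exhausts, Python would return None —
-- unreachable under the else-branch, the [] => final case is never taken there.
def RTP_goA : List String → List String → List String
  | [], final => final
  | i :: rest, final =>
      if i == "0x00" then RTP_goA rest final.dropLast else final

def RemoveTrailingPadding (hexList : List String) : List String :=
  if PySem.List.count hexList "0x00" = (hexList.length : Int) then ["0x00"]
  else RTP_goA hexList.reverse hexList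

-- ===== PORT B =====
-- 'for i, x in enumerate(hexList): if x != '0x00': last = i'
def RTP_lastIdx (hexList : List String) : Int :=
  (PySem.List.enumerate hexList).foldl
    (fun last p => if p.2 ≠ "0x00" then p.1 else last) (-1)

-- 'del hexList[last+1:]; return hexList' keeps exactly the first last+1 elements
def RemoveTrailingPadding_alt (hexList : List String) : List String :=
  let last := RTP_lastIdx hexList
  if last = -1 then ["0x00"]
  else hexList.take (last + 1).toNat

-- ===== PRECONDITION & SPEC =====
def Spec_RemoveTrailingPadding (hexList : List String) (out : List String) : Prop := out = RemoveTrailingPadding_alt hexList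
instance (hexList : List String) (out : List String) : Decidable (Spec_RemoveTrailingPadding hexList out) := by unfold Spec_RemoveTrailingPadding; infer_instance

-- ===== CLAIM (what is proved, stated in full; the proofs are below) =====
def Claim_equal_RemoveTrailingPadding : Prop := ∀ (hexList : List String), Dom_RemoveTrailingPadding hexList → Spec_RemoveTrailingPadding hexList (RemoveTrailingPadding hexList)

-- ===== LEMMAS AND PROOFS =====

lemma RTP_lastIdx_concat (xs : List String) (a : String) :
    RTP_lastIdx (xs ++ [a]) = if a = "0x00" then RTP_lastIdx xs else (xs.length : Int) := by
  unfold RTP_lastIdx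
  rw [PySem.List.enumerate_append, List.foldl_append]
  by_cases h : a = "0x00" <;>
    simp [PySem.List.enumerate_cons, PySem.List.enumerate_nil, h]

lemma RTP_lastIdx_lt (xs : List String) :
    -1 ≤ RTP_lastIdx xs ∧ RTP_lastIdx xs < (xs.length : Int) := by
  induction xs using List.reverseRecOn with
  | nil => simp [RTP_lastIdx, PySem.List.enumerate_nil]
  | append_singleton ys a ih =>
    obtain ⟨h1, h2⟩ := ih
    rw [RTP_lastIdx_concat]
    by_cases h : a = "0x00"
    · rw [if_pos h]; simp only [List.length_append, List.length_singleton]; push_cast; omega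
    · rw [if_neg h]; simp only [List.length_append, List.length_singleton]; push_cast; omega

lemma RTP_lastIdx_neg_iff (xs : List String) :
    RTP_lastIdx xs = -1 ↔ ∀ x ∈ xs, x = "0x00" := by
  induction xs using List.reverseRecOn with
  | nil => simp [RTP_lastIdx, PySem.List.enumerate_nil]
  | append_singleton ys a ih =>
    rw [RTP_lastIdx_concat]
    by_cases h : a = "0x00"
    · rw [if_pos h, ih]
      exact ⟨fun hh x hx => (List.mem_append.mp hx).elim (hh x) (by simp [h]),
             fun hh x hx => hh x (List.mem_append.mpr (Or.inl hx))⟩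
    · have := RTP_lastIdx_lt ys
      rw [if_neg h]
      constructor
      · intro hlen; omega
      · intro hall; exact absurd (hall a (by simp)) h

lemma RTP_count_eq_len_iff (xs : List String) :
    PySem.List.count xs "0x00" = (xs.length : Int) ↔ ∀ x ∈ xs, x = "0x00" := by
  rw [PySem.List.count_eq]
  constructor
  · intro h x hx
    have hc : xs.count "0x00" = xs.length := by exact_mod_cast h
    exact (List.count_eq_length.mp hc x hx).symm
  · intro h
    have : xs.count "0x00" = xs.length :=
      List.count_eq_length.mpr (fun x hx => (h x hx).symm)
    exact_mod_cast this

lemma RTP_main (xs : List String) :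
    RemoveTrailingPadding xs = RemoveTrailingPadding_alt xs := by
  induction xs using List.reverseRecOn with
  | nil => simp [RemoveTrailingPadding, RemoveTrailingPadding_alt, RTP_lastIdx,
      PySem.List.enumerate_nil, PySem.List.count_eq]
  | append_singleton ys a ih =>
    by_cases ha : a = "0x00"
    · subst ha
      by_cases hall : ∀ x ∈ ys, x = "0x00"
      · -- everything is padding: both return ["0x00"]
        have hA : PySem.List.count (ys ++ ["0x00"]) "0x00" = ((ys ++ ["0x00"]).length : Int) :=
          (RTP_count_eq_len_iff _).mpr (fun x hx => (List.mem_append.mp hx).elim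
            (hall x) (by simp))
        have hB : RTP_lastIdx (ys ++ ["0x00"]) = -1 := by
          rw [RTP_lastIdx_concat]; simp [(RTP_lastIdx_neg_iff ys).mpr hall]
        unfold RemoveTrailingPadding RemoveTrailingPadding_alt
        rw [if_pos hA, hB]
        simp
      · -- a trailing '0x00' over a list with a non-padding element:
        -- both sides reduce to their value on ys, then apply ih
        have hcnt_ys : ¬ PySem.List.count ys "0x00" = (ys.length : Int) :=
          fun h => hall ((RTP_count_eq_len_iff ys).mp h)
        have hcnt : ¬ PySem.List.count (ys ++ ["0x00"]) "0x00" = ((ys ++ ["0x00"]).length : Int) :=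
          fun h => hall (fun x hx => (RTP_count_eq_len_iff _).mp h x (by simp [hx]))
        have hA : RemoveTrailingPadding (ys ++ ["0x00"]) = RemoveTrailingPadding ys := by
          unfold RemoveTrailingPadding
          rw [if_neg hcnt, if_neg hcnt_ys, List.reverse_append]
          simp only [List.reverse_singleton, List.singleton_append, RTP_goA,
            beq_self_eq_true, if_true, List.dropLast_concat]
        have hlast : RTP_lastIdx (ys ++ ["0x00"]) = RTP_lastIdx ys := by
          rw [RTP_lastIdx_concat]; simp
        have hne : RTP_lastIdx ys ≠ -1 := fun h => hall ((RTP_lastIdx_neg_iff ys).mp h)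
        have hle : (RTP_lastIdx ys + 1).toNat ≤ ys.length := by
          have := RTP_lastIdx_lt ys; omega
        have hB : RemoveTrailingPadding_alt (ys ++ ["0x00"]) = RemoveTrailingPadding_alt ys := by
          unfold RemoveTrailingPadding_alt
          rw [hlast]
          simp only [if_neg hne]
          exact List.take_append_of_le_length hle
        rw [hA, hB]; exact ih
    · -- last element is not padding: both return ys ++ [a] directly
      have hcnt : ¬ PySem.List.count (ys ++ [a]) "0x00" = ((ys ++ [a]).length : Int) :=
        fun h => ha ((RTP_count_eq_len_iff _).mp h a (by simp))
      have hp : (a == "0x00") = false := beq_eq_false_iff_ne.mpr ha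
      have hgo : RTP_goA (ys ++ [a]).reverse (ys ++ [a]) = ys ++ [a] := by
        rw [List.reverse_append]
        simp [RTP_goA, hp]
      have hB : RTP_lastIdx (ys ++ [a]) = (ys.length : Int) := by
        rw [RTP_lastIdx_concat, if_neg ha]
      unfold RemoveTrailingPadding RemoveTrailingPadding_alt
      rw [if_neg hcnt, hgo, hB, if_neg (by omega : ¬ ((ys.length : Int)) = -1)]
      rw [show ((ys.length : Int) + 1).toNat = ys.length + 1 by omega]
      simp [List.take_append]

-- ===== VERDICT (by name: the statement is the Claim_ definition above) =====
theorem RemoveTrailingPadding_spec : Claim_equal_RemoveTrailingPadding := by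
  intro xs _
  unfold Spec_RemoveTrailingPadding
  exact RTP_main xs
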